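-- pv_equiv track=rewrite | github.com/jahatfi/ddt | tests/example_all_types/all_types.py | get_key_to_set_with_highest_value
-- ===== SOURCE A (Python) =====
-- def get_key_to_set_with_highest_value(dictionary:dict):
--     """
--     Used to test unit_test_generator_decorator with
--     dictionary and set arguments.
--
--     Given a dictionary mapping arbitary numeric keys to
--     sets of numbers, return the key to the set with the
--     overall highest value.  In case of ties, return the
--     lowest key.
--     """
--     # Sort the keys so lowest key is kept in case of ties
--     # The linear search will therefore use '>', not '>=
--     keys = sorted(list(dictionary.keys()))
--     # Take the first key, max(set) pair as the initial best value
--     best_key = keys[0]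
--     highest_value = max(dictionary[keys[0]])
--     # Now conduct linear search over the rest of the dictionary
--     # Skip the first key since we started with that one
--     for this_key in keys[1:]:
--         this_highest_value = max(dictionary[this_key])
--         if this_highest_value > highest_value:
--             best_key = this_key
--             highest_value = this_highest_value
--     return best_key
-- ===== SOURCE B (Python) =====
-- def get_key_to_set_with_highest_value(dictionary: dict):
--     """
--     Given a dictionary mapping arbitrary numeric keys to sets of
--     numbers, return the key to the set with the overall highest
--     value; on ties, the lowest key.
--
--     Two-pass formulation: first the overall highest value across
--     all sets, then the lowest key whose set reaches it.
--     """
--     best = max(max(s) for s in dictionary.values())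
--     return min(k for k in dictionary if max(dictionary[k]) == best)
-- ===== Notes on version B (the rewrite author's own statement) =====
-- stated objective: simpler
-- what changed: Replaces A's sort-the-keys-then-linear-argmax-scan with a sortless two-pass reduction: take the global maximum over all sets, then the minimum key whose set attains it.
import Mathlib
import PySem

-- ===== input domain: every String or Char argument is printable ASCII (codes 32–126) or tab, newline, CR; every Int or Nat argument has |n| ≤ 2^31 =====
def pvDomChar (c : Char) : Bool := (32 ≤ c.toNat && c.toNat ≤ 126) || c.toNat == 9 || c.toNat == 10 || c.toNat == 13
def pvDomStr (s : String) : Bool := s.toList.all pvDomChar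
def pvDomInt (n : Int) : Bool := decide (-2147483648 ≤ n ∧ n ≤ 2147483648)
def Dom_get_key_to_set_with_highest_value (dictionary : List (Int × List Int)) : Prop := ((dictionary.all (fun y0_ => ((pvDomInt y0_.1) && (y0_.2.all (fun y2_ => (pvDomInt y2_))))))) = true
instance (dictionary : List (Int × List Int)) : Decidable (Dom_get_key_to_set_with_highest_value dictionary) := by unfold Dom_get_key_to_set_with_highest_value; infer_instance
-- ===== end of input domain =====

-- B replaces A's sort-the-keys-then-argmax scan with a two-pass reduction (global max, then min key attaining it); objective: simpler.


-- ===== PORT A =====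
-- max(s) for a nonempty s; the .getD 0 default is never reached inside Pre_ (all sets nonempty there)
def pvMaxD (s : List Int) : Int := (PySem.List.max? s (fun y => y)).getD 0

def get_key_to_set_with_highest_value (dictionary : List (Int × List Int)) : Int :=
  let d := PySem.Dict.mk dictionary
  let keys := PySem.List.sorted d.keys (fun y => y)
  match keys with
  | [] => 0  -- keys[0] raises IndexError in Python; excluded by Pre_
  | k0 :: rest =>
    let hv0 := pvMaxD (d.getD k0 [])
    (rest.foldl (fun st this_key =>
        let m := pvMaxD (d.getD this_key [])
        if st.2 < m then (this_key, m) else st) (k0, hv0)).1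

-- ===== PORT B =====
def get_key_to_set_with_highest_value_alt (dictionary : List (Int × List Int)) : Int :=
  let d := PySem.Dict.mk dictionary
  let best := pvMaxD (d.values.map pvMaxD)
  (PySem.List.min? (d.keys.filter (fun k => pvMaxD (d.getD k []) == best)) (fun y => y)).getD 0

-- ===== PRECONDITION & SPEC =====
-- Pre_ excludes exactly the inputs where the Python A raises (empty dict → IndexError on keys[0];
-- an empty set among the values → ValueError from max) and assoc lists with duplicate keys, which
-- do not encode any Python dict (dict keys are unique).
def Pre_get_key_to_set_with_highest_value (dictionary : List (Int × List Int)) : Prop :=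
  dictionary ≠ [] ∧ (∀ p ∈ dictionary, p.2 ≠ []) ∧ (dictionary.map Prod.fst).Nodup
instance (dictionary : List (Int × List Int)) : Decidable (Pre_get_key_to_set_with_highest_value dictionary) := by unfold Pre_get_key_to_set_with_highest_value; infer_instance
def pvWitness_get_key_to_set_with_highest_value : (List (Int × List Int)) := [(2, [1, 7]), (1, [7, 3]), (3, [0])]

def Spec_get_key_to_set_with_highest_value (dictionary : List (Int × List Int)) (out : Int) : Prop := out = get_key_to_set_with_highest_value_alt dictionary
instance (dictionary : List (Int × List Int)) (out : Int) : Decidable (Spec_get_key_to_set_with_highest_value dictionary out) := by unfold Spec_get_key_to_set_with_highest_value; infer_instance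

-- ===== CLAIM (what is proved, stated in full; the proofs are below) =====
def Claim_equal_get_key_to_set_with_highest_value : Prop := ∀ (dictionary : List (Int × List Int)), Dom_get_key_to_set_with_highest_value dictionary → Pre_get_key_to_set_with_highest_value dictionary → Spec_get_key_to_set_with_highest_value dictionary (get_key_to_set_with_highest_value dictionary)

-- ===== LEMMAS AND PROOFS =====

-- A's linear scan with strict '>' keeps the FIRST key (in scan order) attaining the running maximum.
theorem pvLoopA (g : Int → Int) (ks : List Int) : ∀ (k0 : Int),
    (ks.foldl (fun st k => if st.2 < g k then (k, g k) else st) (k0, g k0)).2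
      = (ks.map g).foldl max (g k0)
    ∧ (k0 :: ks).find? (fun k => g k == (ks.map g).foldl max (g k0))
      = some (ks.foldl (fun st k => if st.2 < g k then (k, g k) else st) (k0, g k0)).1 := by
  induction ks with
  | nil =>
    intro k0
    simp [List.find?]
  | cons k ks' ih =>
    intro k0
    simp only [List.foldl_cons, List.map_cons]
    by_cases h : g k0 < g k
    · rw [if_pos h, max_eq_right h.le]
      obtain ⟨ih2, ihf⟩ := ih k
      refine ⟨ih2, ?_⟩
      have hM : g k ≤ (ks'.map g).foldl max (g k) := (PySem.List.le_foldl_max _ _).1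
      have hc : (g k0 == (ks'.map g).foldl max (g k)) = false := by
        simp only [beq_eq_false_iff_ne, ne_eq]; omega
      rw [List.find?_cons]
      simp only [hc]
      exact ihf
    · rw [if_neg h, max_eq_left (le_of_not_gt h)]
      obtain ⟨ih2, ihf⟩ := ih k0
      refine ⟨ih2, ?_⟩
      by_cases hk0 : g k0 = (ks'.map g).foldl max (g k0)
      · have hc : (g k0 == (ks'.map g).foldl max (g k0)) = true := beq_iff_eq.mpr hk0
        rw [List.find?_cons] at ihf ⊢
        simp only [hc] at ihf ⊢
        exact ihf
      · have hlt : g k0 < (ks'.map g).foldl max (g k0) :=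
          lt_of_le_of_ne (PySem.List.le_foldl_max _ _).1 hk0
        have hc0 : (g k0 == (ks'.map g).foldl max (g k0)) = false := by
          simp only [beq_eq_false_iff_ne, ne_eq]; omega
        have hck : (g k == (ks'.map g).foldl max (g k0)) = false := by
          simp only [beq_eq_false_iff_ne, ne_eq]; omega
        rw [List.find?_cons] at ihf ⊢
        simp only [hc0] at ihf ⊢
        rw [List.find?_cons]
        simp only [hck]
        exact ihf

-- find? is the head of the filtered list
theorem pvFind?_eq_head?_filter (p : Int → Bool) (l : List Int) :
    l.find? p = (l.filter p).head? := by
  induction l with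
  | nil => rfl
  | cons x t ih =>
    cases h : p x with
    | true => rw [List.find?_cons_of_pos h, List.filter_cons_of_pos h, List.head?_cons]
    | false => rw [List.find?_cons_of_neg (by simp [h]), List.filter_cons_of_neg (by simp [h]), ih]

-- the running-min over a ≤-sorted nonempty list is its head
theorem pvFoldlMin_of_pairwise (y : Int) (t : List Int) (h : (y :: t).Pairwise (· ≤ ·)) :
    t.foldl min y = y := by
  induction t generalizing y with
  | nil => rfl
  | cons a t ih =>
    have h1 := List.pairwise_cons.mp h
    have hy : y ≤ a := h1.1 a (by simp)
    have h' : (y :: t).Pairwise (· ≤ ·) :=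
      List.pairwise_cons.mpr ⟨fun b hb => h1.1 b (by simp [hb]), (List.pairwise_cons.mp h1.2).2⟩
    simpa [min_eq_left hy] using ih y h'

-- the running max/min lands in the list
theorem pvFoldlMax_mem (t : List Int) : ∀ x : Int, t.foldl max x ∈ x :: t := by
  induction t with
  | nil => intro x; simp
  | cons a t ih =>
    intro x
    simp only [List.foldl_cons]
    rcases List.mem_cons.mp (ih (max x a)) with h | h
    · rw [h]; rcases max_choice x a with e | e <;> rw [e] <;> simp
    · simp [h]

theorem pvFoldlMin_mem (t : List Int) : ∀ x : Int, t.foldl min x ∈ x :: t := by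
  induction t with
  | nil => intro x; simp
  | cons a t ih =>
    intro x
    simp only [List.foldl_cons]
    rcases List.mem_cons.mp (ih (min x a)) with h | h
    · rw [h]; rcases min_choice x a with e | e <;> rw [e] <;> simp
    · simp [h]

theorem pvFoldlMin_le (t : List Int) : ∀ x : Int, t.foldl min x ≤ x ∧ ∀ y ∈ t, t.foldl min x ≤ y := by
  induction t with
  | nil => intro x; simp
  | cons a t ih =>
    intro x
    obtain ⟨h1, h2⟩ := ih (min x a)
    simp only [List.foldl_cons]
    refine ⟨le_trans h1 (min_le_left _ _), ?_⟩
    intro y hy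
    rcases List.mem_cons.mp hy with rfl | hy
    · exact le_trans h1 (min_le_right _ _)
    · exact h2 y hy

-- the running max/min over a list depends only on the multiset of its elements
theorem pvFoldlMax_perm (x x' : Int) (t t' : List Int) (h : (x :: t).Perm (x' :: t')) :
    t.foldl max x = t'.foldl max x' := by
  have hb := PySem.List.le_foldl_max t x
  have hb' := PySem.List.le_foldl_max t' x'
  apply le_antisymm
  · rcases List.mem_cons.mp (h.mem_iff.mp (pvFoldlMax_mem t x)) with e | e
    · rw [e]; exact hb'.1
    · exact hb'.2 _ e
  · rcases List.mem_cons.mp (h.symm.mem_iff.mp (pvFoldlMax_mem t' x')) with e | e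
    · rw [e]; exact hb.1
    · exact hb.2 _ e

theorem pvFoldlMin_perm (x x' : Int) (t t' : List Int) (h : (x :: t).Perm (x' :: t')) :
    t.foldl min x = t'.foldl min x' := by
  have hb := pvFoldlMin_le t x
  have hb' := pvFoldlMin_le t' x'
  apply le_antisymm
  · rcases List.mem_cons.mp (h.symm.mem_iff.mp (pvFoldlMin_mem t' x')) with e | e
    · rw [e]; exact hb.1
    · exact hb.2 _ e
  · rcases List.mem_cons.mp (h.mem_iff.mp (pvFoldlMin_mem t x)) with e | e
    · rw [e]; exact hb'.1
    · exact hb'.2 _ e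

-- max?/min? with the identity key depend only on the multiset of elements
theorem pvMax?_id_perm (l l' : List Int) (h : l.Perm l') :
    PySem.List.max? l (fun y => y) = PySem.List.max? l' (fun y => y) := by
  cases l with
  | nil => rw [List.nil_perm.mp h]
  | cons x t =>
    cases l' with
    | nil => exact absurd h.symm (by simp [List.nil_perm])
    | cons x' t' =>
      rw [PySem.List.max?_id_cons, PySem.List.max?_id_cons, pvFoldlMax_perm x x' t t' h]

theorem pvMin?_id_perm (l l' : List Int) (h : l.Perm l') :
    PySem.List.min? l (fun y => y) = PySem.List.min? l' (fun y => y) := by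
  cases l with
  | nil => rw [List.nil_perm.mp h]
  | cons x t =>
    cases l' with
    | nil => exact absurd h.symm (by simp [List.nil_perm])
    | cons x' t' =>
      rw [PySem.List.min?_id_cons, PySem.List.min?_id_cons, pvFoldlMin_perm x x' t t' h]

-- the whole equivalence, on the raw hypotheses
theorem pvMainEq (dict : List (Int × List Int)) (hne : dict ≠ [])
    (hnd : (dict.map Prod.fst).Nodup) :
    get_key_to_set_with_highest_value dict = get_key_to_set_with_highest_value_alt dict := by
  set d := PySem.Dict.mk dict with hd
  set g : Int → Int := fun k => pvMaxD (d.getD k []) with hg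
  have hkeys : d.keys = dict.map Prod.fst := rfl
  have hknd : d.keys.Nodup := by rw [hkeys]; exact hnd
  obtain ⟨k0, rest, hs⟩ : ∃ k0 rest, PySem.List.sorted d.keys (fun y => y) = k0 :: rest := by
    cases hsr : PySem.List.sorted d.keys (fun y => y) with
    | nil =>
      have hp := PySem.List.sorted_perm d.keys (fun y => y) false
      rw [hsr] at hp
      have hk : d.keys = [] := List.nil_perm.mp hp
      rw [hkeys] at hk
      exact absurd (List.map_eq_nil_iff.mp hk) hne
    | cons a b => exact ⟨a, b, rfl⟩
  obtain ⟨hr2, hfind⟩ := pvLoopA g rest k0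
  set a := (rest.foldl (fun st k => if st.2 < g k then (k, g k) else st) (k0, g k0)).1 with ha
  set M := (rest.map g).foldl max (g k0) with hM
  have hA : get_key_to_set_with_highest_value dict = a := by
    simp only [get_key_to_set_with_highest_value, ← hd, hs, ha, hg]
  have hperm : (k0 :: rest).Perm d.keys := hs ▸ PySem.List.sorted_perm d.keys (fun y => y) false
  have hvals_eq : d.values.map pvMaxD = d.keys.map g := by
    show (d.items.map Prod.snd).map pvMaxD = (d.items.map Prod.fst).map g
    rw [List.map_map, List.map_map]
    refine List.map_congr_left ?_
    intro p hp
    have : d.getD p.1 [] = p.2 :=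
      PySem.Dict.getD_of_mem_items d (by simpa using hp) hknd []
    simp [hg, Function.comp, this]
  have hbest : pvMaxD (d.values.map pvMaxD) = M := by
    rw [hvals_eq]
    unfold pvMaxD
    rw [pvMax?_id_perm _ _ ((hperm.map g).symm), List.map_cons, PySem.List.max?_id_cons]
    rfl
  have hB : get_key_to_set_with_highest_value_alt dict
      = (PySem.List.min? (d.keys.filter (fun k => g k == M)) (fun y => y)).getD 0 := by
    simp only [get_key_to_set_with_highest_value_alt, ← hd, hbest, hg]
  have hhead : ((k0 :: rest).filter (fun k => g k == M)).head? = some a := by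
    rw [← pvFind?_eq_head?_filter]; exact hfind
  obtain ⟨tail, hfil⟩ : ∃ tail, (k0 :: rest).filter (fun k => g k == M) = a :: tail := by
    cases hf : (k0 :: rest).filter (fun k => g k == M) with
    | nil => rw [hf] at hhead; simp at hhead
    | cons y t =>
      rw [hf] at hhead
      simp only [List.head?_cons, Option.some.injEq] at hhead
      exact ⟨t, by rw [hhead]⟩
  have hpw : (a :: tail).Pairwise (· ≤ ·) := by
    rw [← hfil]
    refine List.Pairwise.filter _ ?_
    have := PySem.List.sorted_pairwise d.keys (fun y => y)
    rw [hs] at this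
    exact this
  have hmin : PySem.List.min? (d.keys.filter (fun k => g k == M)) (fun y => y) = some a := by
    rw [pvMin?_id_perm _ _ (hperm.filter _).symm, hfil, PySem.List.min?_id_cons,
        pvFoldlMin_of_pairwise a tail hpw]
  rw [hA, hB, hmin]
  rfl

-- ===== VERDICT (by name: the statement is the Claim_ definition above) =====
theorem get_key_to_set_with_highest_value_spec : Claim_equal_get_key_to_set_with_highest_value := by
  intro dictionary _ hpre
  unfold Spec_get_key_to_set_with_highest_value
  exact pvMainEq dictionary hpre.1 hpre.2.2
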